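-- pv_equiv track=rewrite | github.com/lugia574/algorism | venv/BeakJoon_2775_APmember.py | ap_cnt
-- ===== SOURCE A (Python) =====
-- def ap_cnt (K, N):
--     apt = [[0 for _ in range(15)] for _ in range(15)]
--
--     for i in range(15):
--         apt[i][1] = 1
--         apt[0][i] = i
--
--     for i in range(1, 15):
--         for j in range(2, 15):
--             apt[i][j] = apt[i][j - 1] + apt[i - 1][j];
--
--     return apt[K][N]
-- ===== SOURCE B (Python) =====
-- def _binom(n, k):
--     # iterative product formula for C(n, k); 0 when k < 0 or k > n
--     if k < 0 or k > n:
--         return 0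
--     r = 1
--     for t in range(k):
--         r = r * (n - t) // (t + 1)
--     return r
--
--
-- def ap_cnt(K, N):
--     # closed form: cell (i, j) of A's DP table equals C(i + j, i + 1)
--     table = [[_binom(i + j, i + 1) for j in range(15)] for i in range(15)]
--     return table[K][N]
-- ===== Notes on version B (the rewrite author's own statement) =====
-- stated objective: simpler
-- what changed: Each table cell is computed independently by the closed-form binomial C(i+j, i+1) instead of being accumulated by the nested DP recurrence; the 15x15 table and the final [K][N] lookup stay.
import Mathlib
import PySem

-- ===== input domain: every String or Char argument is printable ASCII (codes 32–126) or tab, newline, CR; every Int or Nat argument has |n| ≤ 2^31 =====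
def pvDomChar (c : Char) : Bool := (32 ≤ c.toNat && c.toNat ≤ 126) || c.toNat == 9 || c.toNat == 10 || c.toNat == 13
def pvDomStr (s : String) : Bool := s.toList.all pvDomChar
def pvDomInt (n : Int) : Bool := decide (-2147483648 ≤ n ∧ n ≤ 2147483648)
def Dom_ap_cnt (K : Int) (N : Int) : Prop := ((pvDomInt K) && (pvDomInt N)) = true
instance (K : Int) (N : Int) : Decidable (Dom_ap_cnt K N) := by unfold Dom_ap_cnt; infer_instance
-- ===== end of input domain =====

-- B replaces A's two-loop DP recurrence by an independent closed-form binomial per table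
-- cell (objective: simpler); same 15×15 table and the same final [K][N] lookup.

-- ===== PORT A =====

-- apt[i][j] = v  (i, j are in-range non-negative indices here)
def pvSetCell (apt : List (List Int)) (i j : Nat) (v : Int) : List (List Int) :=
  apt.set i ((apt.getD i []).set j v)

-- apt[i][j] read with in-range non-negative indices
def pvCell (apt : List (List Int)) (i j : Nat) : Int :=
  (apt.getD i []).getD j 0

-- the table A builds: zeros, base row/column, then the DP recurrence
def pvTableA : List (List Int) :=
  let apt := List.replicate 15 (List.replicate 15 (0 : Int))
  let apt := (PySem.List.pyRange 0 15 1).foldl (fun a i =>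
      let a := pvSetCell a i.toNat 1 1
      pvSetCell a 0 i.toNat i) apt
  (PySem.List.pyRange 1 15 1).foldl (fun a i =>
    (PySem.List.pyRange 2 15 1).foldl (fun a j =>
      pvSetCell a i.toNat j.toNat
        (pvCell a i.toNat (j.toNat - 1) + pvCell a (i.toNat - 1) j.toNat)) a) apt

def ap_cnt (K : Int) (N : Int) : Int :=
  match PySem.List.pyGet? pvTableA K with
  | some row => (PySem.List.pyGet? row N).getD 0   -- none is IndexError, excluded by Pre_
  | none => 0                                       -- IndexError, excluded by Pre_

-- ===== PORT B =====

-- iterative product formula for C(n, k); 0 when k < 0 or k > n (Source B's _binom)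
def pvBinom (n k : Int) : Int :=
  if k < 0 ∨ n < k then 0
  else (PySem.List.pyRange 0 k 1).foldl (fun r t => PySem.Int.floordiv (r * (n - t)) (t + 1)) 1

-- B's table: each cell filled independently with the closed form C(i + j, i + 1)
def pvTableB : List (List Int) :=
  (PySem.List.pyRange 0 15 1).map (fun i =>
    (PySem.List.pyRange 0 15 1).map (fun j => pvBinom (i + j) (i + 1)))

def ap_cnt_alt (K : Int) (N : Int) : Int :=
  match PySem.List.pyGet? pvTableB K with
  | some row => (PySem.List.pyGet? row N).getD 0
  | none => 0

-- ===== PRECONDITION & SPEC =====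
-- Exactly the indices Python accepts into a 15×15 table (negative = wraparound);
-- outside, A raises IndexError.
def Pre_ap_cnt (K : Int) (N : Int) : Prop := -15 ≤ K ∧ K < 15 ∧ -15 ≤ N ∧ N < 15
instance (K : Int) (N : Int) : Decidable (Pre_ap_cnt K N) := by unfold Pre_ap_cnt; infer_instance
def pvWitness_ap_cnt : Int × Int := (2, 3)

def Spec_ap_cnt (K : Int) (N : Int) (out : Int) : Prop := out = ap_cnt_alt K N
instance (K : Int) (N : Int) (out : Int) : Decidable (Spec_ap_cnt K N out) := by unfold Spec_ap_cnt; infer_instance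

-- ===== CLAIM (what is proved, stated in full; the proofs are below) =====
def Claim_equal_ap_cnt : Prop := ∀ (K : Int) (N : Int), Dom_ap_cnt K N → Pre_ap_cnt K N → Spec_ap_cnt K N (ap_cnt K N)

-- ===== LEMMAS AND PROOFS =====

-- the DP table and the closed-form table are the same 15×15 list of lists
set_option maxRecDepth 4000 in
theorem pvTables_eq : pvTableA = pvTableB := by decide

-- ===== VERDICT (by name: the statement is the Claim_ definition above) =====
theorem ap_cnt_spec : Claim_equal_ap_cnt := by
  intro K N _ _
  unfold Spec_ap_cnt ap_cnt ap_cnt_alt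
  rw [pvTables_eq]
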